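-- pv_equiv track=rewrite | github.com/ikerfernandezmolano/Python | L1_Cifrado/criptoanalisis.py | sustitucionAutomatica
-- ===== SOURCE A (Python) =====
-- import string
--
-- def sustitucionAutomatica(freq, letras):
--     freq_copy = freq.copy()
--     clave = {}
--     for letra in string.ascii_uppercase:
--         letra_mas_frecuente = max(freq_copy, key=freq_copy.get)
--         if freq_copy[letra_mas_frecuente] <= 0:
--             break
--         clave[letra_mas_frecuente] = letra
--         freq_copy[letra_mas_frecuente] = -1
--     return clave
-- ===== SOURCE B (Python) =====
-- import string
--
-- def sustitucionAutomatica(freq, letras):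
--     orden = sorted(freq, key=freq.get, reverse=True)
--     clave = {}
--     for letra, k in zip(string.ascii_uppercase, orden):
--         if freq[k] <= 0:
--             break
--         clave[k] = letra
--     return clave
-- ===== Notes on version B (the rewrite author's own statement) =====
-- stated objective: faster
-- what changed: A's up-to-26 repeated Python-level max-scans over a mutated copy are replaced by one stable descending sort plus a single zip assignment pass (freq is not copied or mutated).
import Mathlib
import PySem

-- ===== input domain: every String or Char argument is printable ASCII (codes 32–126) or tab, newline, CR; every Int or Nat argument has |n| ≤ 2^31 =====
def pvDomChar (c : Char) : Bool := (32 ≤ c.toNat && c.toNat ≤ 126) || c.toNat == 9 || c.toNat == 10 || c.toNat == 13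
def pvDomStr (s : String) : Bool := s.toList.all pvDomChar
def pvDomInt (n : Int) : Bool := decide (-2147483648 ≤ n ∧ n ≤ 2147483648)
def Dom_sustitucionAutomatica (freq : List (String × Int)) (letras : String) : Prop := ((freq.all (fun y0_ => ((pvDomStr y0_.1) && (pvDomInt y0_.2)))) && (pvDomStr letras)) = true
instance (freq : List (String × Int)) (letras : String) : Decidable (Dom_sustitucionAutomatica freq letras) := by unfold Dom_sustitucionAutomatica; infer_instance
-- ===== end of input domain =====

-- B replaces A's up-to-26 repeated max-scans over a mutated copy by one stable descending
-- sort plus a single zip pass; measurably faster, and freq is not copied or mutated.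


-- string.ascii_uppercase
def pvUpper : List Char := "ABCDEFGHIJKLMNOPQRSTUVWXYZ".toList

-- ===== PORT A =====
-- the for-loop of A: one letter per iteration; max(freq_copy, key=freq_copy.get) is
-- PySem.List.max? over the dict's keys (none = Python's ValueError on an empty dict,
-- excluded by Pre_); freq_copy[k] = -1 is Dict.insert (overwrite in place).
def loopA (letters : List Char) (d : PySem.Dict String Int) (clave : PySem.Dict String String) : PySem.Dict String String :=
  match letters with
  | [] => clave
  | c :: cs =>
    match PySem.List.max? d.keys (fun k => d.getD k 0) with
    | none => clave   -- Python raises ValueError here; outside Pre_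
    | some m =>
      if d.getD m 0 ≤ 0 then clave
      else loopA cs (d.insert m (-1)) (clave.insert m (String.mk [c]))

def sustitucionAutomatica (freq : List (String × Int)) (letras : String) : List (String × String) :=
  (loopA pvUpper (PySem.Dict.ofList freq) PySem.Dict.empty).items

-- ===== PORT B =====
-- the zip loop of B: pairs (letra, k) from zip(string.ascii_uppercase, orden)
def loopB (d : PySem.Dict String Int) (pairs : List (Char × String)) (clave : PySem.Dict String String) : PySem.Dict String String :=
  match pairs with
  | [] => clave
  | (c, k) :: rest =>
    if d.getD k 0 ≤ 0 then clave
    else loopB d rest (clave.insert k (String.mk [c]))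

def sustitucionAutomatica_alt (freq : List (String × Int)) (letras : String) : List (String × String) :=
  let d := PySem.Dict.ofList freq
  let orden := PySem.List.sorted d.keys (fun k => d.getD k 0) true
  (loopB d (pvUpper.zip orden) PySem.Dict.empty).items

-- ===== PRECONDITION & SPEC =====
-- Pre_ excludes only freq = [], where Python's max() raises ValueError on the empty dict.
def Pre_sustitucionAutomatica (freq : List (String × Int)) (letras : String) : Prop := freq ≠ []
instance (freq : List (String × Int)) (letras : String) : Decidable (Pre_sustitucionAutomatica freq letras) := by unfold Pre_sustitucionAutomatica; infer_instance
def pvWitness_sustitucionAutomatica : (List (String × Int)) × String := ([("E", 3), ("A", 1)], "HOLA")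

def Spec_sustitucionAutomatica (freq : List (String × Int)) (letras : String) (out : List (String × String)) : Prop := out = sustitucionAutomatica_alt freq letras
instance (freq : List (String × Int)) (letras : String) (out : List (String × String)) : Decidable (Spec_sustitucionAutomatica freq letras out) := by unfold Spec_sustitucionAutomatica; infer_instance

-- ===== CLAIM (what is proved, stated in full; the proofs are below) =====
def Claim_equal_sustitucionAutomatica : Prop := ∀ (freq : List (String × Int)) (letras : String), Dom_sustitucionAutomatica freq letras → Pre_sustitucionAutomatica freq letras → Spec_sustitucionAutomatica freq letras (sustitucionAutomatica freq letras)

-- ===== LEMMAS AND PROOFS =====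

-- the foldl step of PySem.List.max?
def maxStep (g : String → Int) (acc : Option String) (x : String) : Option String :=
  match acc with
  | none => some x
  | some m => if g m < g x then some x else some m

theorem max?_eq_foldl (xs : List String) (g : String → Int) :
    PySem.List.max? xs g = xs.foldl (maxStep g) none := by
  unfold PySem.List.max? maxStep
  congr 1
  funext acc x
  cases acc <;> rfl

theorem foldl_maxStep_stay (g : String → Int) (bs : List String) (m : String)
    (h : ∀ b ∈ bs, ¬ g m < g b) : bs.foldl (maxStep g) (some m) = some m := by
  induction bs with
  | nil => rfl
  | cons b bs ih =>
    have hb := h b (by simp)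
    simp only [List.foldl_cons, maxStep, if_neg hb]
    exact ih (fun x hx => h x (by simp [hx]))

-- max? returns the FIRST element attaining the maximum
theorem max?_first (g : String → Int) (as bs : List String) (m : String)
    (ha : ∀ a ∈ as, g a < g m) (hb : ∀ b ∈ bs, ¬ g m < g b) :
    PySem.List.max? (as ++ m :: bs) g = some m := by
  rw [max?_eq_foldl, List.foldl_append]
  have hmem : ∀ o, as.foldl (maxStep g) none = o → o = none ∨ ∃ a ∈ as, o = some a := by
    intro o ho
    cases o with
    | none => exact Or.inl rfl
    | some a =>
      right
      have : PySem.List.max? as g = some a := by rw [max?_eq_foldl, ho]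
      exact ⟨a, PySem.List.max?_mem this, rfl⟩
  rcases hmem _ rfl with h | ⟨a, hamem, h⟩ <;> rw [h]
  · simp only [List.foldl_cons, maxStep]
    exact foldl_maxStep_stay g bs m hb
  · simp only [List.foldl_cons, maxStep, if_pos (ha a hamem)]
    exact foldl_maxStep_stay g bs m hb

theorem max?_congr (xs : List String) (g g' : String → Int)
    (h : ∀ x ∈ xs, g x = g' x) : PySem.List.max? xs g = PySem.List.max? xs g' := by
  rw [max?_eq_foldl, max?_eq_foldl]
  have main : ∀ (xs : List String) (acc : Option String),
      (∀ x ∈ xs, g x = g' x) → (∀ m, acc = some m → g m = g' m) →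
      xs.foldl (maxStep g) acc = xs.foldl (maxStep g') acc := by
    intro xs
    induction xs with
    | nil => intro acc _ _; rfl
    | cons x xs ih =>
      intro acc hx hacc
      have hx0 : g x = g' x := hx x (by simp)
      have hstep : maxStep g acc x = maxStep g' acc x := by
        cases acc with
        | none => rfl
        | some m => simp only [maxStep, hx0, hacc m rfl]
      simp only [List.foldl_cons, hstep]
      refine ih _ (fun y hy => hx y (by simp [hy])) ?_
      intro m hm
      cases acc with
      | none => simp only [maxStep] at hm; cases hm; exact hx0
      | some m0 =>
        simp only [maxStep] at hm
        split at hm <;> cases hm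
        · exact hx0
        · exact hacc _ rfl
  exact main xs none h (by simp)

-- insertBy inserts its element into the list, before the first y with 'before x y'
theorem insertBy_split (before : String → String → Bool) (x : String) (l : List String) :
    ∃ l1 l2, l = l1 ++ l2 ∧ PySem.List.insertBy before x l = l1 ++ x :: l2 ∧
      (∀ y ∈ l1, before x y = false) ∧ (∀ z, l2.head? = some z → before x z = true) := by
  induction l with
  | nil => exact ⟨[], [], by simp [PySem.List.insertBy]⟩
  | cons y ys ih =>
    by_cases hxy : before x y = true
    · exact ⟨[], y :: ys, by simp [PySem.List.insertBy, hxy]⟩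
    · obtain ⟨l1, l2, he, hi, h1, h2⟩ := ih
      refine ⟨y :: l1, l2, by simp [he], ?_, ?_, h2⟩
      · simp only [PySem.List.insertBy, hxy]
        simp only [Bool.not_eq_true] at hxy
        simpa [hxy] using hi
      · intro z hz
        rcases List.mem_cons.mp hz with hz | hz
        · subst hz; simpa using hxy
        · exact h1 z hz

-- STABILITY of the descending sort: elements with a fixed key value keep their order
theorem sorted_rev_filter_stable (xs : List String) (g : String → Int) (v : Int) :
    (PySem.List.sorted xs g true).filter (fun x => decide (g x = v)) =
      xs.filter (fun x => decide (g x = v)) := by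
  induction xs using List.reverseRecOn with
  | nil => rfl
  | append_singleton xs x ih =>
    have hsa : PySem.List.sorted (xs ++ [x]) g true =
        PySem.List.insertBy (fun a b => decide (g b < g a)) x (PySem.List.sorted xs g true) := by
      simp [PySem.List.sorted, List.foldl_append]
    obtain ⟨l1, l2, he, hi, h1, h2⟩ :=
      insertBy_split (fun a b => decide (g b < g a)) x (PySem.List.sorted xs g true)
    have hpw : (PySem.List.sorted xs g true).Pairwise (fun a b => g b ≤ g a) :=
      PySem.List.sorted_pairwise_rev xs g
    have hl2 : ∀ w ∈ l2, g w < g x := by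
      intro w hw
      cases l2 with
      | nil => simp at hw
      | cons z l2' =>
        have hz : g z < g x := of_decide_eq_true (h2 z rfl)
        rcases List.mem_cons.mp hw with hw | hw
        · exact hw ▸ hz
        · have hsub : (z :: l2').Pairwise (fun a b => g b ≤ g a) :=
            (he ▸ hpw).sublist (List.sublist_append_right l1 _)
          exact lt_of_le_of_lt ((List.pairwise_cons.mp hsub).1 w hw) hz
    rw [hsa, hi]
    have hflsorted : l1.filter (fun y => decide (g y = v)) ++ l2.filter (fun y => decide (g y = v))
        = xs.filter (fun y => decide (g y = v)) := by
      rw [← List.filter_append, ← he, ih]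
    by_cases hx : g x = v
    · have hfl2 : l2.filter (fun y => decide (g y = v)) = [] := by
        rw [List.filter_eq_nil_iff]
        intro w hw
        have := hl2 w hw
        simp only [decide_eq_true_eq]
        omega
      rw [List.filter_append, List.filter_cons, List.filter_append, List.filter_cons]
      simp only [hx, decide_true, if_pos, hfl2, List.filter_nil]
      rw [← hflsorted, hfl2]
      simp
    · rw [List.filter_append, List.filter_cons, List.filter_append, List.filter_cons]
      simp only [hx, decide_false, List.filter_nil]
      simp [hflsorted]

theorem append_cons_inj {α : Type} (m : α) (l1 l2 l3 l4 : List α)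
    (h : l1 ++ m :: l2 = l3 ++ m :: l4) (h1 : m ∉ l1) (h3 : m ∉ l3) :
    l1 = l3 ∧ l2 = l4 := by
  induction l1 generalizing l3 with
  | nil =>
    cases l3 with
    | nil => simpa using h
    | cons c cs =>
      simp only [List.nil_append, List.cons_append, List.cons.injEq] at h
      exact absurd (by simp [h.1] : m ∈ c :: cs) h3
  | cons a as ih =>
    cases l3 with
    | nil =>
      simp only [List.nil_append, List.cons_append, List.cons.injEq] at h
      exact absurd (by simp [h.1] : m ∈ a :: as) h1
    | cons c cs =>
      simp only [List.cons_append, List.cons.injEq] at h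
      have := ih cs h.2 (fun hm => h1 (by simp [hm])) (fun hm => h3 (by simp [hm]))
      exact ⟨by simp [h.1, this.1], this.2⟩

-- the key step: with the keys of 'pre' masked to -1, the first maximum is the head of
-- the remaining sorted suffix, provided its value is positive
theorem max?_masked (keys pre zs : List String) (m : String) (f : String → Int)
    (hnd : keys.Nodup) (horden : PySem.List.sorted keys f true = pre ++ m :: zs)
    (hm : 0 < f m) :
    PySem.List.max? keys (fun k => if k ∈ pre then -1 else f k) = some m := by
  have hsnd : (PySem.List.sorted keys f true).Nodup :=
    (PySem.List.sorted_perm keys f true).nodup_iff.mpr hnd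
  have hsnd' : (pre ++ m :: zs).Nodup := horden ▸ hsnd
  have hmpre : m ∉ pre := by
    have := (List.nodup_append.mp hsnd').2.2
    intro hc
    exact this m hc m (by simp) rfl
  have hmem_sorted : ∀ k, k ∈ keys ↔ k ∈ pre ++ m :: zs := by
    intro k
    rw [← horden, PySem.List.mem_sorted]
  have hpw : (pre ++ m :: zs).Pairwise (fun a b => f b ≤ f a) :=
    horden ▸ PySem.List.sorted_pairwise_rev keys f
  have hzs : ∀ z ∈ zs, f z ≤ f m :=
    (List.pairwise_cons.mp (List.pairwise_append.mp hpw).2.1).1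
  have hm_mem : m ∈ keys := (hmem_sorted m).mpr (by simp)
  obtain ⟨as, bs, hkeys⟩ := List.append_of_mem hm_mem
  have hknd : (as ++ m :: bs).Nodup := hkeys ▸ hnd
  have hmas : m ∉ as := by
    have := (List.nodup_append.mp hknd).2.2
    intro hc
    exact this m hc m (by simp) rfl
  have hmbs : m ∉ bs := by
    have := (List.nodup_append.mp hknd).2.1
    simpa using (List.nodup_cons.mp this).1
  rw [hkeys]
  have hgm : (if m ∈ pre then (-1 : Int) else f m) = f m := if_neg hmpre
  apply max?_first
  · -- every earlier key has strictly smaller masked value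
    intro a ha
    rw [hgm]
    by_cases hap : a ∈ pre
    · rw [if_pos hap]; omega
    · rw [if_neg hap]
      have ham : a ≠ m := fun hc => hmas (hc ▸ ha)
      have hazs : a ∈ zs := by
        have := (hmem_sorted a).mp (hkeys ▸ List.mem_append_left _ ha)
        rcases List.mem_append.mp this with h | h
        · exact absurd h hap
        · rcases List.mem_cons.mp h with h | h
          · exact absurd h ham
          · exact h
      rcases lt_or_eq_of_le (hzs a hazs) with h | h
      · exact h
      · -- tie: stability forces m before a in keys, contradiction with a ∈ as
        exfalso
        have hfil := sorted_rev_filter_stable keys f (f m)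
        rw [horden, hkeys] at hfil
        rw [List.filter_append, List.filter_cons, List.filter_append, List.filter_cons] at hfil
        simp only [decide_true, if_pos] at hfil
        have hsplit := append_cons_inj m _ _ _ _ hfil
          (by simp only [List.mem_filter]; exact fun hc => hmpre hc.1)
          (by simp only [List.mem_filter]; exact fun hc => hmas hc.1)
        have habs : a ∈ bs := by
          have : a ∈ zs.filter (fun y => decide (f y = f m)) :=
            List.mem_filter.mpr ⟨hazs, by simp [h]⟩
          rw [hsplit.2] at this
          exact (List.mem_filter.mp this).1
        exact (List.nodup_append.mp hknd).2.2 a ha a (by simp [habs]) rfl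
  · -- every later key has masked value ≤ f m
    intro b hb
    rw [hgm]
    by_cases hbp : b ∈ pre
    · rw [if_pos hbp]; omega
    · rw [if_neg hbp]
      have hbm : b ≠ m := fun hc => hmbs (hc ▸ hb)
      have hbzs : b ∈ zs := by
        have := (hmem_sorted b).mp (hkeys ▸ List.mem_append_right _ (by simp [hb]))
        rcases List.mem_append.mp this with h | h
        · exact absurd h hbp
        · rcases List.mem_cons.mp h with h | h
          · exact absurd h hbm
          · exact h
      exact not_lt.mpr (hzs b hbzs)

-- pre.foldl insert -1
def setNeg (d : PySem.Dict String Int) (pre : List String) : PySem.Dict String Int :=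
  pre.foldl (fun d k => d.insert k (-1)) d

theorem setNeg_keys (d : PySem.Dict String Int) (pre : List String)
    (h : ∀ k ∈ pre, k ∈ d.keys) : (setNeg d pre).keys = d.keys := by
  induction pre using List.reverseRecOn with
  | nil => rfl
  | append_singleton pre p ih =>
    have hstep : setNeg d (pre ++ [p]) = (setNeg d pre).insert p (-1) := by
      simp [setNeg, List.foldl_append]
    have hpre := ih (fun k hk => h k (by simp [hk]))
    rw [hstep, PySem.Dict.keys_insert_of_contains, hpre]
    rw [PySem.Dict.contains_iff_mem_keys, hpre]
    exact h p (by simp)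

theorem setNeg_getD (d : PySem.Dict String Int) (pre : List String) (k : String) :
    (setNeg d pre).getD k 0 = if k ∈ pre then -1 else d.getD k 0 := by
  induction pre using List.reverseRecOn with
  | nil => simp [setNeg]
  | append_singleton pre p ih =>
    have hstep : setNeg d (pre ++ [p]) = (setNeg d pre).insert p (-1) := by
      simp [setNeg, List.foldl_append]
    rw [hstep, PySem.Dict.getD_insert]
    by_cases hkp : k = p
    · simp [hkp]
    · simp [hkp, ih]

-- the master loop lemma
theorem loop_master (cs : List Char) (d0 : PySem.Dict String Int) (pre zs : List String)
    (clave : PySem.Dict String String)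
    (hnd : d0.keys.Nodup)
    (horden : PySem.List.sorted d0.keys (fun k => d0.getD k 0) true = pre ++ zs)
    (hpos : ∀ k ∈ pre, 0 < d0.getD k 0) :
    loopA cs (setNeg d0 pre) clave = loopB d0 (cs.zip zs) clave := by
  induction cs generalizing pre zs clave with
  | nil => simp [loopA, loopB]
  | cons c cs ih =>
    have hsnd : (pre ++ zs).Nodup :=
      horden ▸ (PySem.List.sorted_perm d0.keys (fun k => d0.getD k 0) true).nodup_iff.mpr hnd
    have hmem_sorted : ∀ k, k ∈ d0.keys ↔ k ∈ pre ++ zs := by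
      intro k
      rw [← horden, PySem.List.mem_sorted]
    have hkeysub : ∀ k ∈ pre, k ∈ d0.keys :=
      fun k hk => (hmem_sorted k).mpr (List.mem_append_left _ hk)
    have hdk : (setNeg d0 pre).keys = d0.keys := setNeg_keys d0 pre hkeysub
    have hg := setNeg_getD d0 pre
    cases zs with
    | nil =>
      -- zip runs dry on B's side; on A's side every key is already -1 (or the dict is empty)
      simp only [List.zip_nil_right, loopB]
      simp only [loopA]
      cases hmax : PySem.List.max? (setNeg d0 pre).keys (fun k => (setNeg d0 pre).getD k 0) with
      | none => rfl
      | some m =>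
        have hm : m ∈ pre := by
          have := PySem.List.max?_mem hmax
          rw [hdk] at this
          simpa using (hmem_sorted m).mp this
        simp [hg m, hm]
    | cons m zs' =>
      have hpw : (pre ++ m :: zs').Pairwise (fun a b => d0.getD b 0 ≤ d0.getD a 0) :=
        horden ▸ PySem.List.sorted_pairwise_rev d0.keys (fun k => d0.getD k 0)
      have hzs : ∀ z ∈ zs', d0.getD z 0 ≤ d0.getD m 0 :=
        (List.pairwise_cons.mp (List.pairwise_append.mp hpw).2.1).1
      have hmpre : m ∉ pre := by
        have := (List.nodup_append.mp hsnd).2.2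
        intro hc
        exact this m hc m (by simp) rfl
      by_cases hfm : d0.getD m 0 ≤ 0
      · -- break on both sides
        simp only [List.zip_cons_cons, loopB, if_pos hfm]
        simp only [loopA]
        cases hmax : PySem.List.max? (setNeg d0 pre).keys (fun k => (setNeg d0 pre).getD k 0) with
        | none => rfl
        | some m' =>
          have hm' : m' ∈ pre ++ m :: zs' := by
            have := PySem.List.max?_mem hmax
            rw [hdk] at this
            exact (hmem_sorted m').mp this
          have hle : (setNeg d0 pre).getD m' 0 ≤ 0 := by
            rw [hg m']
            by_cases hp : m' ∈ pre
            · simp [hp]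
            · rw [if_neg hp]
              rcases List.mem_append.mp hm' with h | h
              · exact absurd h hp
              · rcases List.mem_cons.mp h with h | h
                · exact h ▸ hfm
                · exact le_trans (hzs _ h) hfm
          simp [hle]
      · -- assign the next letter on both sides
        rw [not_le] at hfm
        have hmax : PySem.List.max? (setNeg d0 pre).keys (fun k => (setNeg d0 pre).getD k 0)
            = some m := by
          rw [hdk, max?_congr d0.keys _ (fun k => if k ∈ pre then -1 else d0.getD k 0)
            (fun x _ => hg x)]
          exact max?_masked d0.keys pre zs' m (fun k => d0.getD k 0) hnd horden hfm
        have hgm : (setNeg d0 pre).getD m 0 = d0.getD m 0 := by rw [hg m, if_neg hmpre]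
        simp only [List.zip_cons_cons, loopB, if_neg (not_le.mpr hfm), loopA, hmax]
        rw [hgm, if_neg (not_le.mpr hfm)]
        have hins : (setNeg d0 pre).insert m (-1) = setNeg d0 (pre ++ [m]) := by
          simp [setNeg, List.foldl_append]
        rw [hins]
        exact ih (pre ++ [m]) zs' _ (by simpa using horden)
          (fun k hk => by
            rcases List.mem_append.mp hk with h | h
            · exact hpos k h
            · simpa using (List.mem_singleton.mp (by simpa using h)) ▸ hfm)

-- ===== VERDICT (by name: the statement is the Claim_ definition above) =====
theorem sustitucionAutomatica_spec : Claim_equal_sustitucionAutomatica := by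
  intro freq letras _ _
  unfold Spec_sustitucionAutomatica sustitucionAutomatica sustitucionAutomatica_alt
  have h := loop_master pvUpper (PySem.Dict.ofList freq) []
    (PySem.List.sorted (PySem.Dict.ofList freq).keys (fun k => (PySem.Dict.ofList freq).getD k 0) true)
    PySem.Dict.empty (PySem.Dict.nodup_keys_ofList freq) (by simp) (by simp)
  simpa [setNeg] using congrArg PySem.Dict.items h
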